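-- pv_equiv track=rewrite | github.com/DANU011/CodingTest | DANU/python/20310.py | balance_binary_string
-- ===== SOURCE A (Python) =====
-- def balance_binary_string(s):
--     n = list(s)
--     zero = n.count('0') // 2
--     one = n.count('1') // 2
--
--     for _ in range(zero):
--         n.pop(-(n[::-1].index('0') + 1))
--
--     for _ in range(one):
--         n.pop(n.index('1'))
--
--     return ''.join(n)
-- ===== SOURCE B (Python) =====
-- def balance_binary_string(s):
--     zeros = s.count('0')
--     ones = s.count('1')
--     s = ''.join(s.rsplit('0', zeros // 2))   # drop the last zeros//2 '0's
--     return ''.join(s.split('1', ones // 2))  # drop the first ones//2 '1's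
-- ===== Notes on version B (the rewrite author's own statement) =====
-- stated objective: faster
-- what changed: Replaced A's two pop-by-search loops (each iteration reverses/scans the list and pops one element) with two counts plus a maxsplit-bounded rsplit/split and join, removing the last zeros//2 '0's and the first ones//2 '1's without any per-removal rescanning.
import Mathlib
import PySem

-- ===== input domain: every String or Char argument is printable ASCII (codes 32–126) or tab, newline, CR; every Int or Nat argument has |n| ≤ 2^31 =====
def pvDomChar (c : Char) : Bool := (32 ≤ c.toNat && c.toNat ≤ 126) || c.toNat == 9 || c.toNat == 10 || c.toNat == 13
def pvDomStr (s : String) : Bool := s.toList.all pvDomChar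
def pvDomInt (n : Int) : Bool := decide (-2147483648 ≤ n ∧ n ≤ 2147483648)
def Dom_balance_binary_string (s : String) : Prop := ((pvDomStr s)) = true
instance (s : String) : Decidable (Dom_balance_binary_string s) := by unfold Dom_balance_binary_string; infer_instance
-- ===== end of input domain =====

-- B replaces A's two pop-by-search loops by counting plus maxsplit-bounded rsplit/split and join (faster; A mutates only its own local list).

-- ===== PORT A =====
-- one step of A's first loop: n.pop(-(n[::-1].index('0') + 1)); n[::-1] is reverse
-- (PySem.List.slice?_none_none_neg_one).  The `none` fallbacks are Python's ValueError/IndexError;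
-- they are unreachable: the loop runs count('0')//2 times, so a '0' is always present.
def pvPopLastZero (n : List Char) : List Char :=
  match PySem.List.index? n.reverse '0' with
  | some i =>
    match PySem.List.pop? n (-((i : Int) + 1)) with
    | some r => r.2
    | none => n
  | none => n

-- one step of A's second loop: n.pop(n.index('1')); same unreachable fallbacks
def pvPopFirstOne (n : List Char) : List Char :=
  match PySem.List.index? n '1' with
  | some i =>
    match PySem.List.pop? n (i : Int) with
    | some r => r.2
    | none => n
  | none => n

-- for _ in range(k): n = step(n)
def pvLoop (step : List Char → List Char) : Nat → List Char → List Char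
  | 0, n => n
  | k + 1, n => pvLoop step k (step n)

def balance_binary_string (s : String) : String :=
  let n := s.toList
  let zero := PySem.List.count n '0' / 2   -- counts are Nat ≥ 0, so Python's // 2 is Nat division
  let one := PySem.List.count n '1' / 2
  let n1 := pvLoop pvPopLastZero zero n
  let n2 := pvLoop pvPopFirstOne one n1
  String.ofList n2                         -- ''.join(n)

-- ===== PORT B =====
-- s.split(c, m): split on c at most m times, from the left
def pvSplitMax (c : Char) : Nat → List Char → List (List Char)
  | _, [] => [[]]
  | m, x :: t =>
    if x = c then
      match m with
      | 0 =>
        match pvSplitMax c 0 t with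
        | [] => [[x]]
        | p :: ps => (x :: p) :: ps
      | m' + 1 => [] :: pvSplitMax c m' t
    else
      match pvSplitMax c m t with
      | [] => [[x]]
      | p :: ps => (x :: p) :: ps

-- ''.join(s.rsplit(c, k)): rsplit splits from the right, so the joined parts are exactly the
-- reverse of the joined left split of the reversed string (exact for this join∘rsplit composite)
def pvJoinRsplit (c : Char) (k : Nat) (l : List Char) : List Char :=
  ((pvSplitMax c k l.reverse).flatten).reverse

def balance_binary_string_alt (s : String) : String :=
  let zeros := PySem.List.count s.toList '0'
  let ones := PySem.List.count s.toList '1'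
  let s1 := pvJoinRsplit '0' (zeros / 2) s.toList           -- ''.join(s.rsplit('0', zeros // 2))
  String.ofList (pvSplitMax '1' (ones / 2) s1).flatten      -- ''.join(s.split('1', ones // 2))

-- ===== PRECONDITION & SPEC =====
def Spec_balance_binary_string (s : String) (out : String) : Prop := out = balance_binary_string_alt s
instance (s : String) (out : String) : Decidable (Spec_balance_binary_string s out) := by unfold Spec_balance_binary_string; infer_instance

-- ===== CLAIM (what is proved, stated in full; the proofs are below) =====
def Claim_equal_balance_binary_string : Prop := ∀ (s : String), Dom_balance_binary_string s → Spec_balance_binary_string s (balance_binary_string s)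

-- ===== LEMMAS AND PROOFS =====

-- drop the first k occurrences of a, keep everything else
def pvDropC (a : Char) : Nat → List Char → List Char
  | _, [] => []
  | k, c :: t =>
    if c = a then
      match k with
      | 0 => c :: pvDropC a 0 t
      | k' + 1 => pvDropC a k' t
    else c :: pvDropC a k t

theorem pvDropC_zero (a : Char) (l : List Char) : pvDropC a 0 l = l := by
  induction l with
  | nil => rfl
  | cons c t ih => by_cases h : c = a <;> simp [pvDropC, h, ih]

theorem pvDropC_comp (a : Char) (j k : Nat) (l : List Char) :
    pvDropC a j (pvDropC a k l) = pvDropC a (j + k) l := by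
  induction l generalizing j k with
  | nil => rfl
  | cons c t ih =>
    by_cases h : c = a
    · cases k with
      | zero =>
        cases j with
        | zero => simp [pvDropC, h, pvDropC_zero]
        | succ j' => simp [pvDropC, h, pvDropC_zero]
      | succ k' =>
        rw [show pvDropC a (k' + 1) (c :: t) = pvDropC a k' t from by simp [pvDropC, h], ih,
          show j + (k' + 1) = (j + k') + 1 from rfl,
          show pvDropC a ((j + k') + 1) (c :: t) = pvDropC a (j + k') t from by simp [pvDropC, h]]
    · simp [pvDropC, h, ih]

theorem pvDropC_of_not_mem (a : Char) (k : Nat) (l : List Char) (h : a ∉ l) :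
    pvDropC a k l = l := by
  induction l with
  | nil => rfl
  | cons c t ih =>
    simp at h
    simp [pvDropC, Ne.symm h.1, ih h.2]

theorem pvDropC_append (a : Char) (k : Nat) (x y : List Char) :
    pvDropC a k (x ++ y) = pvDropC a k x ++ pvDropC a (k - x.count a) y := by
  induction x generalizing k with
  | nil => simp [pvDropC]
  | cons c t ih =>
    by_cases h : c = a
    · have hcnt : (c :: t).count a = t.count a + 1 := by simp [h]
      cases k with
      | zero => simp [pvDropC, h, ih]
      | succ k' =>
        rw [List.cons_append,
          show pvDropC a (k' + 1) (c :: (t ++ y)) = pvDropC a k' (t ++ y) from by simp [pvDropC, h],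
          show pvDropC a (k' + 1) (c :: t) = pvDropC a k' t from by simp [pvDropC, h],
          ih, hcnt, show k' + 1 - (t.count a + 1) = k' - t.count a from by omega]
    · have hcnt : (c :: t).count a = t.count a := by simp [h]
      simp [pvDropC, h, ih, hcnt]

-- drop-first-occurrence, decomposed at the first occurrence
theorem pvDropC_first (a : Char) (pre suf : List Char) (h : a ∉ pre) :
    pvDropC a 1 (pre ++ a :: suf) = pre ++ suf := by
  rw [pvDropC_append, pvDropC_of_not_mem a 1 pre h,
    List.count_eq_zero_of_not_mem h, Nat.sub_zero,
    show pvDropC a 1 (a :: suf) = pvDropC a 0 suf from by simp [pvDropC], pvDropC_zero]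

theorem pvEraseIdx_append_length (c : Char) (pre suf : List Char) :
    (pre ++ c :: suf).eraseIdx pre.length = pre ++ suf := by
  induction pre with
  | nil => rfl
  | cons p pre' ih => simp [ih]

-- A's loop steps computed: pop of the searched index is "erase first '1'" / "erase last '0'"
theorem pvPopFirstOne_spec (l : List Char) (h : '1' ∈ l) :
    pvPopFirstOne l = pvDropC '1' 1 l := by
  obtain ⟨i, hi⟩ := Option.isSome_iff_exists.mp ((PySem.List.index?_isSome_iff l '1').mpr h)
  obtain ⟨pre, suf, hdec, hlen, hpre⟩ := (PySem.List.index?_eq_some_iff l '1' i).mp hi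
  subst hdec
  have hil : i < (pre ++ '1' :: suf).length := by simp; omega
  have hpy : PySem.List.pyIdx? (pre ++ '1' :: suf).length (i : Int) = some i := by
    simp [PySem.List.pyIdx?]
    omega
  have hget : (pre ++ '1' :: suf)[i]? = some '1' := by
    subst hlen
    rw [List.getElem?_append_right (Nat.le_refl _)]
    simp
  unfold pvPopFirstOne
  rw [hi]
  simp only [PySem.List.pop?, hpy, Option.bind_some, hget, Option.map_some]
  subst hlen
  rw [pvEraseIdx_append_length, pvDropC_first '1' pre suf hpre]

theorem pvPopLastZero_spec (l : List Char) (h : '0' ∈ l) :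
    pvPopLastZero l = (pvDropC '0' 1 l.reverse).reverse := by
  obtain ⟨i, hi⟩ := Option.isSome_iff_exists.mp
    ((PySem.List.index?_isSome_iff l.reverse '0').mpr (by simpa using h))
  obtain ⟨pre, suf, hdec, hlen, hpre⟩ := (PySem.List.index?_eq_some_iff l.reverse '0' i).mp hi
  have hl : l = suf.reverse ++ '0' :: pre.reverse := by
    have := congrArg List.reverse hdec
    simpa using this
  subst hl
  have hlen' : (suf.reverse ++ '0' :: pre.reverse).length = suf.length + 1 + pre.length := by
    simp; omega
  have hpy : PySem.List.pyIdx? (suf.reverse ++ '0' :: pre.reverse).length (-((i : Int) + 1)) =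
      some suf.length := by
    rw [hlen']
    subst hlen
    unfold PySem.List.pyIdx?
    rw [if_neg (by omega), if_pos (by push_cast; omega)]
    congr 1
    omega
  have hget : (suf.reverse ++ '0' :: pre.reverse)[suf.length]? = some '0' := by
    rw [show suf.length = suf.reverse.length from by simp]
    rw [List.getElem?_append_right (Nat.le_refl _)]
    simp
  unfold pvPopLastZero
  rw [hi]
  simp only [PySem.List.pop?, hpy, Option.bind_some, hget, Option.map_some]
  rw [show suf.length = suf.reverse.length from by simp, pvEraseIdx_append_length]
  rw [show (suf.reverse ++ '0' :: pre.reverse).reverse = pre ++ '0' :: suf from by simp]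
  rw [pvDropC_first '0' pre suf hpre]
  simp

theorem pvLoopOne (k : Nat) (l : List Char) :
    pvLoop pvPopFirstOne k l = pvDropC '1' k l := by
  induction k generalizing l with
  | zero => simp [pvLoop, pvDropC_zero]
  | succ k' ih =>
    by_cases h : '1' ∈ l
    · rw [pvLoop, pvPopFirstOne_spec l h, ih, pvDropC_comp]
    · have hnone : PySem.List.index? l '1' = none := (PySem.List.index?_eq_none_iff l '1').mpr h
      rw [pvLoop, show pvPopFirstOne l = l from by unfold pvPopFirstOne; rw [hnone], ih,
        pvDropC_of_not_mem '1' _ l h, pvDropC_of_not_mem '1' _ l h]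

theorem pvLoopZero (k : Nat) (l : List Char) :
    pvLoop pvPopLastZero k l = (pvDropC '0' k l.reverse).reverse := by
  induction k generalizing l with
  | zero => simp [pvLoop, pvDropC_zero]
  | succ k' ih =>
    by_cases h : '0' ∈ l
    · rw [pvLoop, pvPopLastZero_spec l h, ih, List.reverse_reverse, pvDropC_comp]
    · have hnone : PySem.List.index? l.reverse '0' = none :=
        (PySem.List.index?_eq_none_iff l.reverse '0').mpr (by simp [h])
      rw [pvLoop, show pvPopLastZero l = l from by unfold pvPopLastZero; rw [hnone], ih,
        pvDropC_of_not_mem '0' _ l.reverse (by simp [h]),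
        pvDropC_of_not_mem '0' _ l.reverse (by simp [h])]

-- joining the pieces of a maxsplit is exactly dropping the first m occurrences
theorem pvSplitMax_flatten (c : Char) (m : Nat) (l : List Char) :
    (pvSplitMax c m l).flatten = pvDropC c m l := by
  induction l generalizing m with
  | nil => rfl
  | cons x t ih =>
    by_cases h : x = c
    · cases m with
      | zero =>
        have ht := ih 0
        rw [show pvDropC c 0 (x :: t) = x :: pvDropC c 0 t from by simp [pvDropC, h],
          pvDropC_zero]
        rw [pvDropC_zero] at ht
        cases hs : pvSplitMax c 0 t with
        | nil => rw [hs] at ht; simp at ht; simp [pvSplitMax, h, ht]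
        | cons p ps =>
          rw [hs] at ht
          rw [show pvSplitMax c 0 (x :: t) = (x :: p) :: ps from by simp [pvSplitMax, h, hs]]
          simp only [List.flatten_cons] at ht ⊢
          rw [List.cons_append, ht]
      | succ m' =>
        rw [show pvDropC c (m' + 1) (x :: t) = pvDropC c m' t from by simp [pvDropC, h]]
        simp [pvSplitMax, h, ih]
    · have ht := ih m
      rw [show pvDropC c m (x :: t) = x :: pvDropC c m t from by simp [pvDropC, h]]
      cases hs : pvSplitMax c m t with
      | nil => rw [hs] at ht; simp at ht; simp [pvSplitMax, h, hs, ht]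
      | cons p ps =>
        rw [hs] at ht
        rw [show pvSplitMax c m (x :: t) = (x :: p) :: ps from by simp [pvSplitMax, h, hs]]
        simp only [List.flatten_cons] at ht ⊢
        rw [List.cons_append, ht]

-- ===== VERDICT (by name: the statement is the Claim_ definition above) =====
theorem balance_binary_string_spec : Claim_equal_balance_binary_string := by
  intro s _
  unfold Spec_balance_binary_string balance_binary_string balance_binary_string_alt pvJoinRsplit
  simp only [PySem.List.count_eq]
  rw [pvLoopZero, pvLoopOne, pvSplitMax_flatten, pvSplitMax_flatten]
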